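-- pv_equiv track=rewrite | github.com/Python-study-f/Algorithm-study_1H | Algorithm_2021/April_2021/210411/49994_Length_of_visit/49994_210407_realedu.py | solution
-- ===== SOURCE A (Python) =====
-- def solution(dirs):
--     dir = {"L":(-1, 0), "U":(0, 1), "R":(1, 0), "D":(0, -1)}
--     visit = set()
--     distance = 0
--     x, y = 0, 0
--
--     for d in dirs:
--         nx = x + dir[d][0]
--         ny = y + dir[d][1]
--
--         if -5 <= nx <= 5 and -5 <= ny <= 5:
--             """
--             if (nx, ny) not in visit:
--                 visit.add((x, y))
--                 visit.add((nx, ny))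
--             """
--             if (x, y, nx, ny) not in visit:
--                 visit.add((x, y, nx, ny))
--                 visit.add((nx, ny, x, y))
--                 distance += 1
--             x, y = nx, ny
--
--     return distance
-- ===== SOURCE B (Python) =====
-- def solution(dirs):
--     # Phase 1: build the trajectory of visited positions (moves leaving the
--     # [-5,5] board are skipped).  Phase 2: canonicalize each consecutive pair
--     # as an undirected edge and count the distinct edges with one set.
--     delta = {"L": (-1, 0), "U": (0, 1), "R": (1, 0), "D": (0, -1)}
--     path = [(0, 0)]
--     cur = (0, 0)
--     for d in dirs:
--         dx, dy = delta[d]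
--         nxt = (cur[0] + dx, cur[1] + dy)
--         if -5 <= nxt[0] <= 5 and -5 <= nxt[1] <= 5:
--             path.append(nxt)
--             cur = nxt
--     edges = set()
--     for p, q in zip(path, path[1:]):
--         edges.add((p, q) if p <= q else (q, p))
--     return len(edges)
-- ===== Notes on version B (the rewrite author's own statement) =====
-- stated objective: alternative
-- what changed: A counts edges on the fly, storing both orientations of every traversed edge in one set checked inside the walk loop; B splits the task into two phases: build the trajectory list first, then canonicalize each consecutive pair as a sorted undirected edge and return the size of the edge set.
import Mathlib
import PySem

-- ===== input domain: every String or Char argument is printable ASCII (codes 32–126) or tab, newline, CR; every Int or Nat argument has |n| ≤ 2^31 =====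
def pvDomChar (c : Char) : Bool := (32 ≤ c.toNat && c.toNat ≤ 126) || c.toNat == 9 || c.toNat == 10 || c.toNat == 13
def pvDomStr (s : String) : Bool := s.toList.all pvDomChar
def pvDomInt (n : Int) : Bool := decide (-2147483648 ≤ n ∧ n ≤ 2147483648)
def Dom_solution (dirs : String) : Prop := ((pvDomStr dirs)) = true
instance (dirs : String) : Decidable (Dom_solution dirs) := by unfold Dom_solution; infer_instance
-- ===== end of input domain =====

-- B splits A's single stateful walk into two phases: build the trajectory list, then count distinct canonical undirected edges of consecutive pairs (alternative decomposition, same cost).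


-- the direction dict literal shared by both Pythons
def pvDelta : PySem.Dict Char (Int × Int) :=
  ((((PySem.Dict.empty).insert 'L' (-1, 0)).insert 'U' (0, 1)).insert 'R' (1, 0)).insert 'D' (0, -1)

-- ===== PORT A =====
-- A's loop: state = (visit set of directed 4-tuples, distance, x, y); none = KeyError on dir[d]
def solGo : List Char → PySem.Set (Int × Int × Int × Int) → Int → Int → Int → Option Int
  | [], _, dist, _, _ => some dist
  | d :: rest, visit, dist, x, y =>
    match PySem.Dict.get? pvDelta d with
    | none => none
    | some dd =>
      let nx := x + dd.1
      let ny := y + dd.2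
      if -5 ≤ nx ∧ nx ≤ 5 ∧ -5 ≤ ny ∧ ny ≤ 5 then
        if (x, y, nx, ny) ∈ visit then solGo rest visit dist nx ny
        else solGo rest (PySem.Set.add (PySem.Set.add visit (x, y, nx, ny)) (nx, ny, x, y)) (dist + 1) nx ny
      else solGo rest visit dist x y

def solution (dirs : String) : Int := (solGo dirs.toList PySem.Set.empty 0 0 0).getD 0

-- ===== PORT B =====
-- '(p, q) if p <= q else (q, p)' — Python tuple comparison is lexicographic
def canonEdge (p q : Int × Int) : (Int × Int) × (Int × Int) :=
  if p.1 < q.1 ∨ (p.1 = q.1 ∧ p.2 ≤ q.2) then (p, q) else (q, p)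

-- phase 1 of B: the trajectory list; none = KeyError on delta[d]
def buildPath : List Char → List (Int × Int) → (Int × Int) → Option (List (Int × Int))
  | [], path, _ => some path
  | d :: rest, path, cur =>
    match PySem.Dict.get? pvDelta d with
    | none => none
    | some dd =>
      let nxt := (cur.1 + dd.1, cur.2 + dd.2)
      if -5 ≤ nxt.1 ∧ nxt.1 ≤ 5 ∧ -5 ≤ nxt.2 ∧ nxt.2 ≤ 5 then
        buildPath rest (path ++ [nxt]) nxt
      else buildPath rest path cur

-- phase 2 of B: edge set over zip(path, path[1:])
def solution_alt (dirs : String) : Int :=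
  match buildPath dirs.toList [(0, 0)] (0, 0) with
  | none => 0
  | some path =>
    (((path.zip (path.drop 1)).foldl
        (fun s pq => PySem.Set.add s (canonEdge pq.1 pq.2)) PySem.Set.empty).length : Int)

-- ===== PRECONDITION & SPEC =====
-- A raises KeyError on any character that is not one of the four direction letters; Pre_ admits exactly the strings A returns on.
def Pre_solution (dirs : String) : Prop :=
  (dirs.toList.all fun c => c == 'L' || c == 'U' || c == 'R' || c == 'D') = true
instance (dirs : String) : Decidable (Pre_solution dirs) := by unfold Pre_solution; infer_instance

def pvWitness_solution : String := "URDL"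

def Spec_solution (dirs : String) (out : Int) : Prop := out = solution_alt dirs
instance (dirs : String) (out : Int) : Decidable (Spec_solution dirs out) := by unfold Spec_solution; infer_instance

-- ===== CLAIM (what is proved, stated in full; the proofs are below) =====
def Claim_equal_solution : Prop := ∀ (dirs : String), Dom_solution dirs → Pre_solution dirs → Spec_solution dirs (solution dirs)

-- ===== LEMMAS AND PROOFS =====

def pairsOf (l : List (Int × Int)) : List ((Int × Int) × (Int × Int)) := l.zip (l.drop 1)

def eset (path : List (Int × Int)) : PySem.Set ((Int × Int) × (Int × Int)) :=
  (pairsOf path).foldl (fun s pq => PySem.Set.add s (canonEdge pq.1 pq.2)) PySem.Set.empty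

lemma canon_eq_iff (p q a b : Int × Int) :
    canonEdge p q = canonEdge a b ↔ (p = a ∧ q = b) ∨ (p = b ∧ q = a) := by
  obtain ⟨p1, p2⟩ := p; obtain ⟨q1, q2⟩ := q; obtain ⟨a1, a2⟩ := a; obtain ⟨b1, b2⟩ := b
  unfold canonEdge
  split_ifs <;> simp [Prod.ext_iff] <;> omega

lemma pairsOf_append (l : List (Int × Int)) (c p : Int × Int) (h : l.getLast? = some c) :
    pairsOf (l ++ [p]) = pairsOf l ++ [(c, p)] := by
  induction l with
  | nil => simp at h
  | cons a t ih =>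
    cases t with
    | nil => simp [List.getLast?] at h; simp [pairsOf, h]
    | cons b t' =>
      have h' : (b :: t').getLast? = some c := by
        rwa [List.getLast?_cons_cons] at h
      have := ih h'
      simp [pairsOf] at this ⊢
      exact this

lemma mem_eset (path : List (Int × Int)) (e : (Int × Int) × (Int × Int)) :
    e ∈ eset path ↔ ∃ pq ∈ pairsOf path, e = canonEdge pq.1 pq.2 := by
  unfold eset
  rw [PySem.Set.mem_foldl_add]
  simp

-- invariant transfer when the edge was already in visit
lemma inv_old (visit : PySem.Set (Int × Int × Int × Int))
    (prs : List ((Int × Int) × (Int × Int))) (x y nx ny : Int)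
    (hvis : ∀ a b c d : Int, (a, b, c, d) ∈ visit ↔
        ((a, b), (c, d)) ∈ prs ∨ ((c, d), (a, b)) ∈ prs)
    (hv : (x, y, nx, ny) ∈ visit) :
    ∀ a b c d : Int, (a, b, c, d) ∈ visit ↔
        ((a, b), (c, d)) ∈ prs ++ [((x, y), (nx, ny))] ∨
        ((c, d), (a, b)) ∈ prs ++ [((x, y), (nx, ny))] := by
  intro a b c d
  constructor
  · intro h
    rcases (hvis a b c d).mp h with h' | h'
    · exact Or.inl (List.mem_append_left _ h')
    · exact Or.inr (List.mem_append_left _ h')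
  · intro h
    rcases h with h | h <;> rw [List.mem_append] at h <;> rcases h with h | h
    · exact (hvis a b c d).mpr (Or.inl h)
    · simp only [List.mem_singleton, Prod.mk.injEq] at h
      obtain ⟨⟨h1, h2⟩, h3, h4⟩ := h
      rw [h1, h2, h3, h4]
      exact hv
    · exact (hvis a b c d).mpr (Or.inr h)
    · simp only [List.mem_singleton, Prod.mk.injEq] at h
      obtain ⟨⟨h1, h2⟩, h3, h4⟩ := h
      rw [h1, h2, h3, h4]
      rcases (hvis x y nx ny).mp hv with h' | h'
      · exact (hvis nx ny x y).mpr (Or.inr h')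
      · exact (hvis nx ny x y).mpr (Or.inl h')
  
-- invariant transfer when both orientations of the new edge are added
lemma inv_new (visit : PySem.Set (Int × Int × Int × Int))
    (prs : List ((Int × Int) × (Int × Int))) (x y nx ny : Int)
    (hvis : ∀ a b c d : Int, (a, b, c, d) ∈ visit ↔
        ((a, b), (c, d)) ∈ prs ∨ ((c, d), (a, b)) ∈ prs) :
    ∀ a b c d : Int,
      (a, b, c, d) ∈ PySem.Set.add (PySem.Set.add visit (x, y, nx, ny)) (nx, ny, x, y) ↔
        ((a, b), (c, d)) ∈ prs ++ [((x, y), (nx, ny))] ∨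
        ((c, d), (a, b)) ∈ prs ++ [((x, y), (nx, ny))] := by
  intro a b c d
  rw [PySem.Set.mem_add, PySem.Set.mem_add]
  constructor
  · intro h
    rcases h with (h | h) | h
    · rcases (hvis a b c d).mp h with h' | h'
      · exact Or.inl (List.mem_append_left _ h')
      · exact Or.inr (List.mem_append_left _ h')
    · simp only [Prod.mk.injEq] at h
      obtain ⟨h1, h2, h3, h4⟩ := h
      rw [h1, h2, h3, h4]
      exact Or.inl (List.mem_append_right _ (List.mem_singleton.mpr rfl))
    · simp only [Prod.mk.injEq] at h
      obtain ⟨h1, h2, h3, h4⟩ := h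
      rw [h1, h2, h3, h4]
      exact Or.inr (List.mem_append_right _ (List.mem_singleton.mpr rfl))
  · intro h
    rcases h with h | h <;> rw [List.mem_append] at h <;> rcases h with h | h
    · exact Or.inl (Or.inl ((hvis a b c d).mpr (Or.inl h)))
    · simp only [List.mem_singleton, Prod.mk.injEq] at h
      obtain ⟨⟨h1, h2⟩, h3, h4⟩ := h
      rw [h1, h2, h3, h4]
      exact Or.inl (Or.inr rfl)
    · exact Or.inl (Or.inl ((hvis a b c d).mpr (Or.inr h)))
    · simp only [List.mem_singleton, Prod.mk.injEq] at h
      obtain ⟨⟨h1, h2⟩, h3, h4⟩ := h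
      rw [h1, h2, h3, h4]
      exact Or.inr rfl

-- the joint invariant: A's running state matches B's trajectory so far
lemma go_eq (ds : List Char) : ∀ (visit : PySem.Set (Int × Int × Int × Int)) (dist x y : Int)
    (path : List (Int × Int)),
    path.getLast? = some (x, y) →
    (∀ a b c d : Int, (a, b, c, d) ∈ visit ↔
        ((a, b), (c, d)) ∈ pairsOf path ∨ ((c, d), (a, b)) ∈ pairsOf path) →
    dist = ((eset path).length : Int) →
    solGo ds visit dist x y = (buildPath ds path (x, y)).map (fun p => ((eset p).length : Int)) := by
  induction ds with
  | nil =>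
    intro visit dist x y path _ _ hdist
    simp [solGo, buildPath, hdist]
  | cons d rest ih =>
    intro visit dist x y path hlast hvis hdist
    rw [solGo, buildPath]
    cases hget : PySem.Dict.get? pvDelta d with
    | none => simp
    | some dd =>
      simp only
      by_cases hb : -5 ≤ x + dd.1 ∧ x + dd.1 ≤ 5 ∧ -5 ≤ y + dd.2 ∧ y + dd.2 ≤ 5
      · rw [if_pos hb, if_pos hb]
        have hpairs : pairsOf (path ++ [(x + dd.1, y + dd.2)]) =
            pairsOf path ++ [((x, y), (x + dd.1, y + dd.2))] :=
          pairsOf_append path (x, y) (x + dd.1, y + dd.2) hlast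
        have hlast' : (path ++ [(x + dd.1, y + dd.2)]).getLast? = some (x + dd.1, y + dd.2) := by
          simp
        have heset' : eset (path ++ [(x + dd.1, y + dd.2)]) =
            PySem.Set.add (eset path) (canonEdge (x, y) (x + dd.1, y + dd.2)) := by
          unfold eset
          rw [hpairs, List.foldl_append]
          rfl
        have hmemiff : ((x, y, x + dd.1, y + dd.2) ∈ visit) ↔
            canonEdge (x, y) (x + dd.1, y + dd.2) ∈ eset path := by
          rw [hvis, mem_eset]
          constructor
          · rintro (hm | hm)
            · exact ⟨((x, y), (x + dd.1, y + dd.2)), hm, rfl⟩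
            · refine ⟨((x + dd.1, y + dd.2), (x, y)), hm, ?_⟩
              rw [canon_eq_iff]; right; exact ⟨rfl, rfl⟩
          · rintro ⟨pq, hpq, hc⟩
            rw [canon_eq_iff] at hc
            rcases hc with ⟨h1, h2⟩ | ⟨h1, h2⟩
            · left; rw [h1, h2, Prod.mk.eta]; exact hpq
            · right; rw [h2, h1, Prod.mk.eta]; exact hpq
        by_cases hv : (x, y, x + dd.1, y + dd.2) ∈ visit
        · rw [if_pos hv]
          have heq : eset (path ++ [(x + dd.1, y + dd.2)]) = eset path := by
            rw [heset', PySem.Set.add_of_mem (hmemiff.mp hv)]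
          have hinv' := inv_old visit (pairsOf path) x y (x + dd.1) (y + dd.2) hvis hv
          rw [← hpairs] at hinv'
          have hdist' : dist = ((eset (path ++ [(x + dd.1, y + dd.2)])).length : Int) := by
            rw [heq]; exact hdist
          exact ih visit dist (x + dd.1) (y + dd.2) (path ++ [(x + dd.1, y + dd.2)]) hlast' hinv' hdist'
        · rw [if_neg hv]
          have hnmem : canonEdge (x, y) (x + dd.1, y + dd.2) ∉ eset path :=
            fun h => hv (hmemiff.mpr h)
          have heq : eset (path ++ [(x + dd.1, y + dd.2)]) =
              eset path ++ [canonEdge (x, y) (x + dd.1, y + dd.2)] := by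
            rw [heset', PySem.Set.add_of_not_mem hnmem]
          have hinv' := inv_new visit (pairsOf path) x y (x + dd.1) (y + dd.2) hvis
          rw [← hpairs] at hinv'
          have hdist' : dist + 1 = ((eset (path ++ [(x + dd.1, y + dd.2)])).length : Int) := by
            rw [heq]; simp [hdist]
          exact ih _ (dist + 1) (x + dd.1) (y + dd.2) (path ++ [(x + dd.1, y + dd.2)]) hlast' hinv' hdist'
      · rw [if_neg hb, if_neg hb]
        exact ih visit dist x y path hlast hvis hdist

-- ===== VERDICT (by name: the statement is the Claim_ definition above) =====
theorem solution_spec : Claim_equal_solution := by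
  intro dirs _ _
  unfold Spec_solution solution solution_alt
  rw [go_eq dirs.toList PySem.Set.empty 0 0 0 [((0 : Int), (0 : Int))] rfl ?_ rfl]
  · cases buildPath dirs.toList [(0, 0)] (0, 0) with
    | none => rfl
    | some path => rfl
  · intro a b c d
    simp [pairsOf, PySem.Set.empty]
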